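-- pv_equiv track=rewrite | github.com/mohammadfaiizan/ProjectI | DSA/Problem/Dynamic Programming/04_Longest_Subsequence/646_Maximum_Length_of_Pair_Chain.py | find_longest_chain_activity_selection
-- ===== SOURCE A (Python) =====
-- def find_longest_chain_activity_selection(pairs):
--     """
--     ACTIVITY SELECTION APPROACH:
--     ============================
--     Treat as classic activity selection problem.
--
--     Time Complexity: O(n log n) - sorting
--     Space Complexity: O(1) - constant space
--     """
--     # This is essentially the activity selection problem
--     # Select maximum number of non-overlapping activities
--
--     if not pairs:
--         return 0
--
--     # Sort by finish time (ending points)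
--     pairs.sort(key=lambda x: x[1])
--
--     count = 1
--     last_finish = pairs[0][1]
--
--     for i in range(1, len(pairs)):
--         # Current activity's start time > last activity's finish time
--         if pairs[i][0] > last_finish:
--             count += 1
--             last_finish = pairs[i][1]
--
--     return count
-- ===== SOURCE B (Python) =====
-- def find_longest_chain_activity_selection(pairs):
--     # Recursive activity selection: sort by finish time in place (same mutation
--     # as A), then repeatedly take the earliest-finishing pair and recurse on the
--     # pairs whose start lies strictly after its finish.
--     pairs.sort(key=lambda x: x[1])
--
--     def chain(chunk):
--         if not chunk:
--             return 0
--         head = chunk[0]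
--         return 1 + chain([p for p in chunk[1:] if p[0] > head[1]])
--
--     return chain(pairs)
-- ===== Notes on version B (the rewrite author's own statement) =====
-- stated objective: alternative
-- what changed: Replaces A's single state-threading greedy scan (count/last_finish accumulator over indices) with a recursive select-first-then-filter formulation: take the earliest-finishing pair, filter out overlapping pairs, recurse.
import Mathlib
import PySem

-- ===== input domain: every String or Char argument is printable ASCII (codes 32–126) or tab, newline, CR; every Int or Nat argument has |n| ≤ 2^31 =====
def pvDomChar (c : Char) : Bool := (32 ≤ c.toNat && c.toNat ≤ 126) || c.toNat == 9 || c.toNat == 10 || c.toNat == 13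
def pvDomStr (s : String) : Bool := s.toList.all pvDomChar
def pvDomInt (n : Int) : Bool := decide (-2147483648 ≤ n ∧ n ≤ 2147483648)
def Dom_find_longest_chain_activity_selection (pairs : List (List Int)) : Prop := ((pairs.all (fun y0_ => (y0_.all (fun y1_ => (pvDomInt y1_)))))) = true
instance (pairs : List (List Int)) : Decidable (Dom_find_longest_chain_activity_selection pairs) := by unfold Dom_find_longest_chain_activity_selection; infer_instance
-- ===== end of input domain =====

-- B replaces A's single state-threading greedy scan with a recursive
-- select-first-then-filter activity selection (objective: alternative).
-- A sorts its argument in place; the equivalence proved here is about the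
-- return value (B performs the same in-place sort).

-- ===== PORT A =====
-- for-loop over range(1, len) reading pairs[i] is rendered as a foldl over
-- (s.drop 1); indexing p[0]/p[1] uses pyGetD, exact under Pre_ (length ≥ 2).
def find_longest_chain_activity_selection (pairs : List (List Int)) : Int :=
  if pairs = [] then 0
  else
    let s := PySem.List.sorted pairs (fun x => PySem.List.pyGetD x 1 0)
    let r := (s.drop 1).foldl
      (fun st p =>
        if PySem.List.pyGetD p 0 0 > st.2 then (st.1 + 1, PySem.List.pyGetD p 1 0) else st)
      ((1 : Int), PySem.List.pyGetD (PySem.List.pyGetD s 0 []) 1 0)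
    r.1

-- ===== PORT B =====
def pvChain (l : List (List Int)) : Int :=
  match l with
  | [] => 0
  | p :: rest =>
      1 + pvChain (rest.filter
        (fun q => decide (PySem.List.pyGetD q 0 0 > PySem.List.pyGetD p 1 0)))
termination_by l.length
decreasing_by
  simp only [List.length_unattach]
  exact Nat.lt_succ_of_le (le_trans (List.length_filter_le _ _) (by simp))

def find_longest_chain_activity_selection_alt (pairs : List (List Int)) : Int :=
  pvChain (PySem.List.sorted pairs (fun x => PySem.List.pyGetD x 1 0))

-- ===== PRECONDITION & SPEC =====
-- Pre_ excludes exactly the inputs where Python raises: some pair shorter than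
-- 2 makes the sort key x[1] (or p[0]) raise IndexError in both A and B.
def Pre_find_longest_chain_activity_selection (pairs : List (List Int)) : Prop :=
  ∀ p ∈ pairs, 2 ≤ p.length
instance (pairs : List (List Int)) : Decidable (Pre_find_longest_chain_activity_selection pairs) := by
  unfold Pre_find_longest_chain_activity_selection; infer_instance

def pvWitness_find_longest_chain_activity_selection : List (List Int) := [[1, 2], [3, 4]]

def Spec_find_longest_chain_activity_selection (pairs : List (List Int)) (out : Int) : Prop := out = find_longest_chain_activity_selection_alt pairs
instance (pairs : List (List Int)) (out : Int) : Decidable (Spec_find_longest_chain_activity_selection pairs out) := by unfold Spec_find_longest_chain_activity_selection; infer_instance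

-- ===== CLAIM (what is proved, stated in full; the proofs are below) =====
def Claim_equal_find_longest_chain_activity_selection : Prop := ∀ (pairs : List (List Int)), Dom_find_longest_chain_activity_selection pairs → Pre_find_longest_chain_activity_selection pairs → Spec_find_longest_chain_activity_selection pairs (find_longest_chain_activity_selection pairs)

-- ===== LEMMAS AND PROOFS =====

-- Greedy loop with threshold t over a finish-sorted tail equals the
-- select-then-filter recursion on the elements whose start exceeds t.
theorem pv_loop_eq_chain (l : List (List Int)) :
    ∀ (c t : Int),
    (∀ q ∈ l, t ≤ PySem.List.pyGetD q 1 0) →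
    l.Pairwise (fun a b => PySem.List.pyGetD a 1 0 ≤ PySem.List.pyGetD b 1 0) →
    (l.foldl
      (fun st p =>
        if PySem.List.pyGetD p 0 0 > st.2 then (st.1 + 1, PySem.List.pyGetD p 1 0) else st)
      (c, t)).1
      = c + pvChain (l.filter (fun q => decide (PySem.List.pyGetD q 0 0 > t))) := by
  induction l with
  | nil => intro c t _ _; simp [pvChain]
  | cons q l' ih =>
      intro c t hlo hpw
      have hq : t ≤ PySem.List.pyGetD q 1 0 := hlo q (by simp)
      have hpw' := (List.pairwise_cons.mp hpw)
      by_cases h : PySem.List.pyGetD q 0 0 > t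
      · simp only [List.foldl_cons, if_pos h]
        rw [ih (c + 1) (PySem.List.pyGetD q 1 0) hpw'.1 hpw'.2]
        have hfilter :
            (l'.filter (fun a => decide (PySem.List.pyGetD a 0 0 > t))).filter
                (fun a => decide (PySem.List.pyGetD a 0 0 > PySem.List.pyGetD q 1 0))
              = l'.filter (fun a => decide (PySem.List.pyGetD a 0 0 > PySem.List.pyGetD q 1 0)) := by
          rw [List.filter_filter]
          apply List.filter_congr
          intro a _
          by_cases ha : PySem.List.pyGetD a 0 0 > PySem.List.pyGetD q 1 0
          · have : PySem.List.pyGetD a 0 0 > t := lt_of_le_of_lt hq ha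
            simp [ha, this]
          · simp [ha]
        rw [List.filter_cons_of_pos (by simpa using h)]
        rw [show pvChain
              ((q :: l'.filter (fun a => decide (PySem.List.pyGetD a 0 0 > t))))
            = 1 + pvChain ((l'.filter (fun a => decide (PySem.List.pyGetD a 0 0 > t))).filter
                (fun a => decide (PySem.List.pyGetD a 0 0 > PySem.List.pyGetD q 1 0))) from by
          rw [pvChain]]
        rw [hfilter]; ring
      · simp only [List.foldl_cons, if_neg h]
        rw [ih c t (fun a ha => hlo a (List.mem_cons_of_mem _ ha)) hpw'.2]
        rw [List.filter_cons_of_neg (by simpa using h)]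

-- ===== VERDICT (by name: the statement is the Claim_ definition above) =====
theorem find_longest_chain_activity_selection_spec : Claim_equal_find_longest_chain_activity_selection := by
  intro pairs _ _
  unfold Spec_find_longest_chain_activity_selection
  unfold find_longest_chain_activity_selection find_longest_chain_activity_selection_alt
  by_cases hnil : pairs = []
  · subst hnil; simp [pvChain, PySem.List.sorted]
  · rw [if_neg hnil]
    set s := PySem.List.sorted pairs (fun x => PySem.List.pyGetD x 1 0) with hs
    have hsne : s ≠ [] := by
      rw [hs, Ne, PySem.List.sorted_eq_nil_iff]; exact hnil
    obtain ⟨p, rest, hcons⟩ := List.exists_cons_of_ne_nil hsne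
    have hpw : s.Pairwise (fun a b => PySem.List.pyGetD a 1 0 ≤ PySem.List.pyGetD b 1 0) := by
      rw [hs]; exact PySem.List.sorted_pairwise pairs _
    rw [hcons] at hpw ⊢
    have hpw' := List.pairwise_cons.mp hpw
    simp only [List.drop_succ_cons, List.drop_zero, PySem.List.pyGetD_zero_cons]
    rw [pv_loop_eq_chain rest 1 (PySem.List.pyGetD p 1 0) hpw'.1 hpw'.2]
    rw [pvChain]
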